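-- pv_equiv track=rewrite | github.com/PDinesen/AdventofCode | 2021/Day14.py | make_n_step_rules
-- ===== SOURCE A (Python) =====
-- def step(ind_string, rules):
--     new_string = ''
--     for i in range(len(ind_string) - 1):
--         if ind_string[i:i+2] in rules.keys():
--             new_string += ind_string[i] + rules[ind_string[i:i+2]]
--         else:
--             new_string += ind_string[i]
--     new_string += ind_string[-1]
--     return new_string
--
-- def make_n_step_rules(rules, n):
--     temp = {}
--     for rule in rules.keys():
--         ans_string = rule
--         for _ in range(n):
--             ans_string = step(ans_string, rules)
--         temp[rule] = ans_string[1:-1]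
--     return temp
-- ===== SOURCE B (Python) =====
-- def make_n_step_rules(rules, n):
--     # Recursive per-pair expansion instead of repeatedly rewriting the whole string.
--     def expand(a, b, k):
--         # full expansion of the two-character string a+b after k insertion steps
--         if k <= 0 or a + b not in rules:
--             return a + b
--         t = a + rules[a + b] + b
--         res = t[0]
--         for i in range(len(t) - 1):
--             res += expand(t[i], t[i + 1], k - 1)[1:]
--         return res
--
--     temp = {}
--     for key in rules:
--         if len(key) < 2:
--             full = key
--         else:
--             full = key[0]
--             for i in range(len(key) - 1):
--                 full += expand(key[i], key[i + 1], n)[1:]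
--         temp[key] = full[1:-1]
--     return temp
-- ===== Notes on version B (the rewrite author's own statement) =====
-- stated objective: faster
-- what changed: A rewrites each rule key's whole string n times with a linear pass per step; B expands each adjacent character pair by direct recursion on the pair structure (expand(a,b,k) glues the expansions of the pairs of a+rules[a+b]+b), so pairs with no applicable rule terminate immediately instead of being re-scanned by all n passes.
import Mathlib
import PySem

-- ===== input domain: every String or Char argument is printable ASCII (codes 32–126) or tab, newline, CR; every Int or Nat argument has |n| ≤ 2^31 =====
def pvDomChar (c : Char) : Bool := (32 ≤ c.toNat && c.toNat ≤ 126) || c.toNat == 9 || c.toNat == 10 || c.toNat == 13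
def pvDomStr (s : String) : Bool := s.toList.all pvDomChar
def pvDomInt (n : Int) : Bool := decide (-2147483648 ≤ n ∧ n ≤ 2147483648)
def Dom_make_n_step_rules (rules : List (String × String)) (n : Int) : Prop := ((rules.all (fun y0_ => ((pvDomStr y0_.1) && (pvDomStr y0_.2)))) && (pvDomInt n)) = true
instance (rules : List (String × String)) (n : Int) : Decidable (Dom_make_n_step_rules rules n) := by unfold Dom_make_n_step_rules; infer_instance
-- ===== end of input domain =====

-- B replaces A's repeated whole-string rewriting by a recursive per-pair expansion (alternative
-- decomposition, same exact result); equivalence is about the returned dict (no mutation).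

-- ===== PORT A =====
-- Python 'step': one pair-insertion pass over the string (strings handled as their char lists).
def stepA (rd : PySem.Dict (List Char) (List Char)) (s : List Char) : List Char :=
  let new := (PySem.List.pyRange 0 ((s.length : Int) - 1) 1).foldl
    (fun acc i =>
      match rd.get? (PySem.List.slice s (some i) (some (i + 2))) with
      | some v => acc ++ (PySem.List.pyGet? s i).elim [] (fun c => [c]) ++ v
      | none => acc ++ (PySem.List.pyGet? s i).elim [] (fun c => [c])) []
  new ++ (PySem.List.pyGet? s (-1)).elim [] (fun c => [c])

def make_n_step_rules (rules : List (String × String)) (n : Int) : List (String × String) :=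
  let rd : PySem.Dict (List Char) (List Char) :=
    PySem.Dict.mk (rules.map (fun p => (p.1.toList, p.2.toList)))
  let temp := rd.keys.foldl
    (fun t rule =>
      let ans := (PySem.List.pyRange 0 n 1).foldl (fun s _ => stepA rd s) rule
      t.insert (String.ofList rule) (String.ofList (PySem.List.slice ans (some 1) (some (-1)))))
    (PySem.Dict.empty)
  temp.items

-- ===== PORT B =====
-- Python B's inner loop 'res = t[0]; for i in ...: res += expand(t[i], t[i+1], k-1)[1:]'
-- as the structural recursion over consecutive pairs of t.
def glueTailB (f : Char → Char → List Char) (x : Char) : List Char → List Char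
  | [] => []
  | y :: r => (f x y).drop 1 ++ glueTailB f y r

-- Python B's 'expand(a, b, k)': full expansion of the pair a+b after k steps.
def expandB (rd : PySem.Dict (List Char) (List Char)) : Nat → Char → Char → List Char
  | 0, a, b => [a, b]
  | (k + 1), a, b =>
    match rd.get? [a, b] with
    | none => [a, b]
    | some v => a :: glueTailB (expandB rd k) a (v ++ [b])

def make_n_step_rules_alt (rules : List (String × String)) (n : Int) : List (String × String) :=
  let rd : PySem.Dict (List Char) (List Char) :=
    PySem.Dict.mk (rules.map (fun p => (p.1.toList, p.2.toList)))
  let temp := rd.keys.foldl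
    (fun t key =>
      let full :=
        if key.length < 2 then key
        else
          match key with
          | [] => []        -- unreachable: length ≥ 2
          | x :: r => x :: glueTailB (expandB rd n.toNat) x r
      t.insert (String.ofList key) (String.ofList (PySem.List.slice full (some 1) (some (-1)))))
    (PySem.Dict.empty)
  temp.items

-- ===== PRECONDITION & SPEC =====
-- Pre_ excludes only the inputs where A raises: with n ≥ 1 an empty-string rule key makes
-- Python's step evaluate ''[-1] and raise IndexError.
def Pre_make_n_step_rules (rules : List (String × String)) (n : Int) : Prop :=
  1 ≤ n → ∀ p ∈ rules, p.1 ≠ ""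
instance (rules : List (String × String)) (n : Int) : Decidable (Pre_make_n_step_rules rules n) := by
  unfold Pre_make_n_step_rules; infer_instance
def pvWitness_make_n_step_rules : (List (String × String)) × Int := ([("AB", "C"), ("BC", "A")], 2)

def Spec_make_n_step_rules (rules : List (String × String)) (n : Int) (out : List (String × String)) : Prop := out = make_n_step_rules_alt rules n
instance (rules : List (String × String)) (n : Int) (out : List (String × String)) : Decidable (Spec_make_n_step_rules rules n out) := by unfold Spec_make_n_step_rules; infer_instance

-- ===== CLAIM (what is proved, stated in full; the proofs are below) =====
def Claim_equal_make_n_step_rules : Prop := ∀ (rules : List (String × String)) (n : Int), Dom_make_n_step_rules rules n → Pre_make_n_step_rules rules n → Spec_make_n_step_rules rules n (make_n_step_rules rules n)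
-- ===== LEMMAS AND PROOFS =====

-- Canonical structural form of one step of A (head char exposed).
def chainTail (rd : PySem.Dict (List Char) (List Char)) (x : Char) : List Char → List Char
  | [] => []
  | y :: t => ((rd.get? [x, y]).getD []) ++ y :: chainTail rd y t

def chainA (rd : PySem.Dict (List Char) (List Char)) : List Char → List Char
  | [] => []
  | x :: t => x :: chainTail rd x t

-- the per-index contribution of A's loop
def gA (rd : PySem.Dict (List Char) (List Char)) (s : List Char) (i : Int) : List Char :=
  (PySem.List.pyGet? s i).elim [] (fun c => [c]) ++
    (rd.get? (PySem.List.slice s (some i) (some (i + 2)))).getD []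

theorem flatMap_map_congr {α β γ : Type} (l : List α) (p q : α → β) (f g : β → List γ)
    (h : ∀ a ∈ l, f (p a) = g (q a)) : (l.map p).flatMap f = (l.map q).flatMap g := by
  induction l with
  | nil => rfl
  | cons a t ih => simp only [List.map_cons, List.flatMap_cons]
                   rw [h a (by simp), ih (fun a ha => h a (by simp [ha]))]

theorem glueTailB_concat (f : Char → Char → List Char) (u : List Char) (x y : Char) (v : List Char) :
    glueTailB f x (u ++ y :: v) = glueTailB f x (u ++ [y]) ++ glueTailB f y v := by
  induction u generalizing x with
  | nil => simp [glueTailB]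
  | cons z u' ih => simp [glueTailB, ih, List.append_assoc]

theorem expandB_none (rd : PySem.Dict (List Char) (List Char)) (m : Nat) (x y : Char)
    (h : rd.get? [x, y] = none) : expandB rd m x y = [x, y] := by
  cases m <;> simp [expandB, h]

theorem glueTailB_pair (f : Char → Char → List Char) (h : ∀ a b, f a b = [a, b])
    (x : Char) (t : List Char) : glueTailB f x t = t := by
  induction t generalizing x with
  | nil => rfl
  | cons y r ih => simp [glueTailB, h, ih]

theorem glueTailB_expand_step (rd : PySem.Dict (List Char) (List Char)) (m : Nat) (x y : Char) :
    glueTailB (expandB rd m) x ((rd.get? [x, y]).getD [] ++ [y]) = (expandB rd (m + 1) x y).drop 1 := by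
  cases h : rd.get? [x, y] with
  | none => simp [glueTailB, expandB, h, expandB_none rd m x y h]
  | some v => simp [expandB, h]

theorem glueTailB_chainTail (rd : PySem.Dict (List Char) (List Char)) (m : Nat)
    (t : List Char) (x : Char) :
    glueTailB (expandB rd m) x (chainTail rd x t) = glueTailB (expandB rd (m + 1)) x t := by
  induction t generalizing x with
  | nil => rfl
  | cons y u ih =>
      show glueTailB (expandB rd m) x ((rd.get? [x, y]).getD [] ++ y :: chainTail rd y u) = _
      rw [glueTailB_concat, glueTailB_expand_step, ih]
      rfl

theorem chainA_iterate (rd : PySem.Dict (List Char) (List Char)) (m : Nat) (x : Char) (t : List Char) :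
    (chainA rd)^[m] (x :: t) = x :: glueTailB (expandB rd m) x t := by
  induction m generalizing x t with
  | zero => simp [glueTailB_pair (expandB rd 0) (fun a b => rfl)]
  | succ m ih =>
      rw [Function.iterate_succ_apply]
      show (chainA rd)^[m] (x :: chainTail rd x t) = _
      rw [ih, glueTailB_chainTail]

theorem foldl_ignore_iterate {α β : Type} (l : List β) (f : α → α) (s : α) :
    l.foldl (fun s _ => f s) s = f^[l.length] s := by
  induction l generalizing s with
  | nil => rfl
  | cons b t ih => simp [List.foldl_cons, ih, Function.iterate_succ_apply]


theorem pyGet?_neg_one_cons_cons (x y : Char) (u : List Char) :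
    PySem.List.pyGet? (x::y::u) (-1) = PySem.List.pyGet? (y::u) (-1) := by
  simp only [PySem.List.pyGet?, PySem.List.pyIdx?]; norm_num; rfl

theorem gA_shift (rd : PySem.Dict (List Char) (List Char)) (z : Char) (l : List Char) (k : Nat) :
    gA rd (z :: l) (((k+1 : Nat) : Int)) = gA rd l ((k : Nat) : Int) := by
  unfold gA
  have hg : PySem.List.pyGet? (z::l) ((k+1:Nat):Int) = PySem.List.pyGet? l ((k:Nat):Int) := by
    rw [PySem.List.pyGet?_natCast, PySem.List.pyGet?_natCast]; simp
  have h2 : (some (((k+1:Nat):Int)+2)) = (some ((k+3:Nat):Int)) := by push_cast; ring_nf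
  have h3 : (some (((k:Nat):Int)+2)) = (some ((k+2:Nat):Int)) := by push_cast; ring_nf
  have hs : PySem.List.slice (z::l) (some ((k+1:Nat):Int)) (some (((k+1:Nat):Int)+2)) =
      PySem.List.slice l (some ((k:Nat):Int)) (some (((k:Nat):Int)+2)) := by
    rw [h2, h3, PySem.List.slice_natCast, PySem.List.slice_natCast]
    have e1 : k+3-(k+1) = 2 := by omega
    have e2 : k+2-k = 2 := by omega
    rw [e1, e2]; simp
  rw [hg, hs]

theorem gA_zero (rd : PySem.Dict (List Char) (List Char)) (x y : Char) (u : List Char) :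
    gA rd (x::y::u) 0 = [x] ++ (rd.get? [x, y]).getD [] := by
  unfold gA
  have h : (0:Int) ≤ (u.length:Int) + 1 := by positivity
  have hp : PySem.List.pyGet? (x::y::u) 0 = some x := by
    simp only [PySem.List.pyGet?, PySem.List.pyIdx?]; norm_num [h]
  have h0 : (some (0:Int)) = (some ((0:Nat):Int)) := rfl
  have h2 : (some ((0:Int)+2)) = (some ((2:Nat):Int)) := by norm_num
  have hs : PySem.List.slice (x::y::u) (some 0) (some (0+2)) = [x, y] := by
    rw [h0, h2, PySem.List.slice_natCast]; rfl
  rw [hp, hs]; rfl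

theorem flatMap_range_gA (rd : PySem.Dict (List Char) (List Char)) (t : List Char) (x : Char) :
    ((List.range t.length).map (fun k => ((k : Nat) : Int))).flatMap (gA rd (x::t)) ++
      (PySem.List.pyGet? (x::t) (-1)).elim [] (fun c => [c]) = chainA rd (x::t) := by
  induction t generalizing x with
  | nil =>
      have hp : PySem.List.pyGet? [x] (-1) = some x := by
        simp only [PySem.List.pyGet?, PySem.List.pyIdx?]; norm_num
      simp [hp, chainA, chainTail]
  | cons y u ih =>
      simp only [List.length_cons, List.range_succ_eq_map, List.map_cons, List.flatMap_cons,
        List.map_map]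
      have hshift : ((List.range u.length).map (fun k => ((Nat.succ k : Nat) : Int))).flatMap
          (gA rd (x::y::u)) =
          ((List.range u.length).map (fun k => ((k : Nat) : Int))).flatMap (gA rd (y::u)) := by
        apply flatMap_map_congr
        intro k _
        exact gA_shift rd x (y::u) k
      rw [show ((fun k => ((k:Nat):Int)) ∘ Nat.succ) = (fun k => ((Nat.succ k : Nat) : Int)) from rfl]
      rw [hshift, pyGet?_neg_one_cons_cons, List.append_assoc, ih y]
      have h00 : ((0:Nat):Int) = (0:Int) := rfl
      rw [h00, gA_zero]
      simp [chainA, chainTail]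

theorem stepA_eq_chainA (rd : PySem.Dict (List Char) (List Char)) (s : List Char) :
    stepA rd s = chainA rd s := by
  cases s with
  | nil =>
      simp [stepA, PySem.List.pyGet?, PySem.List.pyIdx?, chainA]
  | cons x t =>
      unfold stepA
      have hlen : (((x::t).length : Int) - 1) = ((t.length : Nat) : Int) := by
        simp
      rw [hlen, PySem.List.pyRange_zero_natCast]
      rw [PySem.List.foldl_congr_mem _ _ (fun acc i => acc ++ gA rd (x::t) i) []
        (by intro acc i _
            cases h : rd.get? (PySem.List.slice (x::t) (some i) (some (i + 2))) <;>
              simp [gA, h, List.append_assoc])]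
      rw [PySem.List.foldl_append_eq_flatMap]
      simpa using flatMap_range_gA rd t x

theorem pyRange_length_toNat (n : Int) : (PySem.List.pyRange 0 n 1).length = n.toNat := by
  rcases le_or_gt n 0 with h | h
  · have he : PySem.List.pyRange 0 n 1 = [] := by simp [PySem.List.pyRange]; omega
    rw [he]; simp; omega
  · obtain ⟨m, rfl⟩ : ∃ m : Nat, n = (m : Int) := ⟨n.toNat, by omega⟩
    rw [PySem.List.pyRange_zero_natCast]; simp

theorem perKey_eq (rd : PySem.Dict (List Char) (List Char)) (n : Int) (key : List Char)
    (hne : 1 ≤ n → key ≠ []) :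
    (PySem.List.pyRange 0 n 1).foldl (fun s _ => stepA rd s) key =
      (if key.length < 2 then key
       else match key with
         | [] => []
         | x :: r => x :: glueTailB (expandB rd n.toNat) x r) := by
  simp only [stepA_eq_chainA]
  rw [foldl_ignore_iterate, pyRange_length_toNat]
  cases key with
  | nil =>
      have hz : n.toNat = 0 := by
        rcases le_or_gt 1 n with h1 | h1
        · exact absurd rfl (hne h1)
        · omega
      simp [hz]
  | cons x r =>
      rw [chainA_iterate]
      by_cases h2 : (x::r).length < 2
      · have hr0 : r = [] := by
          simp only [List.length_cons] at h2
          exact List.eq_nil_of_length_eq_zero (by omega)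
        subst hr0
        simp [glueTailB]
      · rw [if_neg h2]

-- ===== VERDICT (by name: the statement is the Claim_ definition above) =====
theorem make_n_step_rules_spec : Claim_equal_make_n_step_rules := by
  intro rules n _ hpre
  unfold Spec_make_n_step_rules make_n_step_rules make_n_step_rules_alt
  dsimp only
  congr 1
  apply PySem.List.foldl_congr_mem
  intro t key hkey
  have hne : 1 ≤ n → key ≠ [] := by
    intro hn hnil
    simp only [PySem.Dict.keys_mk, List.map_map, List.mem_map] at hkey
    obtain ⟨p, hp, hpk⟩ := hkey
    have hp1 : p.1 ≠ "" := hpre hn p hp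
    apply hp1
    have htl : p.1.toList = [] := by simpa [hnil] using hpk
    cases hstr : p.1
    simp_all
  rw [perKey_eq _ n key hne]
  cases key <;> rfl
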